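-- pv_equiv track=rewrite | github.com/RunkunXie/LeetCode | Problems/src/321. Create Maximum Number.py | largestKdigits
-- ===== SOURCE A (Python) =====
-- def largestKdigits(nums, k):
--
--     remove_num = len(nums) - k
--     mono_q = []
--
--     for i in nums:
--         while remove_num > 0 and mono_q and mono_q[-1] < i:
--             mono_q.pop()
--             remove_num -= 1
--         mono_q.append(i)
--
--     mono_q = mono_q[:-remove_num] if remove_num > 0 else mono_q
--
--     return mono_q
-- ===== SOURCE B (Python) =====
-- def _drop_one(ds):
--     # Remove the element whose loss keeps the sequence largest:
--     # the first element that is smaller than its successor, else the last one.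
--     for i in range(len(ds) - 1):
--         if ds[i] < ds[i + 1]:
--             return ds[:i] + ds[i + 1:]
--     return ds[:-1]
--
--
-- def largestKdigits(nums, k):
--     n = len(nums)
--     if k <= 0:
--         return []
--     if k >= n:
--         return list(nums)
--     digits = list(nums)
--     for _ in range(n - k):
--         digits = _drop_one(digits)
--     return digits
-- ===== Notes on version B (the rewrite author's own statement) =====
-- stated objective: alternative
-- what changed: Replaces A's single left-to-right monotonic-stack pass (pop while budget remains and top < incoming, then slice off unused budget) with n-k staged passes over the list, each deleting the first element that is smaller than its successor (or the last element when the list is non-increasing), after clamping k<=0 to [] and k>=len(nums) to the whole list.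
import Mathlib
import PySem

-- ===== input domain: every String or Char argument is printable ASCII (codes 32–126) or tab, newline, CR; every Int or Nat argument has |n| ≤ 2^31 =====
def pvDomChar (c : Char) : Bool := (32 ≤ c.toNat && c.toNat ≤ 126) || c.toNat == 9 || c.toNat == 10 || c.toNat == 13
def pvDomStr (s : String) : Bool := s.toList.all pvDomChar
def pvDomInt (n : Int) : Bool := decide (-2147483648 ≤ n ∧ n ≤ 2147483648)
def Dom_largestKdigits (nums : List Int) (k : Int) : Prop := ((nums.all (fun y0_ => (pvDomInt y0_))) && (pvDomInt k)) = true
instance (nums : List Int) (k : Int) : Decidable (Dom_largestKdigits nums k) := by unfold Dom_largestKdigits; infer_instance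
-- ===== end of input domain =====

-- B replaces A's single-pass monotonic-stack sweep by n-k staged passes, each deleting the
-- first element smaller than its successor (else the last); alternative decomposition, not faster.

-- ===== PORT A =====
-- the inner `while remove_num > 0 and mono_q and mono_q[-1] < i: mono_q.pop(); remove_num -= 1`
-- (stack kept top-first: append = cons, mono_q[-1] = head, pop = tail)
def pvPop : List Int → Int → Int → List Int × Int
  | [], rem, _ => ([], rem)
  | t :: rest, rem, i => if rem > 0 ∧ t < i then pvPop rest (rem - 1) i else (t :: rest, rem)

-- one iteration of `for i in nums: <while…>; mono_q.append(i)`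
def pvStep (s : List Int × Int) (i : Int) : List Int × Int :=
  let p := pvPop s.1 s.2 i
  (i :: p.1, p.2)

def largestKdigits (nums : List Int) (k : Int) : List Int :=
  let s := nums.foldl pvStep ([], (nums.length : Int) - k)
  let monoQ := s.1.reverse
  -- `mono_q[:-remove_num] if remove_num > 0 else mono_q` (take clips at 0 exactly as the slice does)
  if s.2 > 0 then monoQ.take (monoQ.length - s.2.toNat) else monoQ

-- ===== PORT B =====
-- `_drop_one`: delete the first element smaller than its successor, else the last element
def pvDropOne : List Int → List Int
  | [] => []
  | [_] => []
  | a :: b :: t => if a < b then b :: t else a :: pvDropOne (b :: t)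

-- `for _ in range(n - k): digits = _drop_one(digits)`
def pvIterDrop : Nat → List Int → List Int
  | 0, ds => ds
  | r + 1, ds => pvIterDrop r (pvDropOne ds)

def largestKdigits_alt (nums : List Int) (k : Int) : List Int :=
  let n : Int := nums.length
  if k ≤ 0 then []
  else if n ≤ k then nums
  else pvIterDrop (n - k).toNat nums

-- ===== PRECONDITION & SPEC =====
def Spec_largestKdigits (nums : List Int) (k : Int) (out : List Int) : Prop := out = largestKdigits_alt nums k
instance (nums : List Int) (k : Int) (out : List Int) : Decidable (Spec_largestKdigits nums k out) := by unfold Spec_largestKdigits; infer_instance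

-- ===== CLAIM (what is proved, stated in full; the proofs are below) =====
def Claim_equal_largestKdigits : Prop := ∀ (nums : List Int) (k : Int), Dom_largestKdigits nums k → Spec_largestKdigits nums k (largestKdigits nums k)

-- ===== LEMMAS AND PROOFS =====

-- A's loop from an arbitrary budget r, followed by A's final slice
def pvAcore (xs : List Int) (r : Int) : List Int :=
  let s := xs.foldl pvStep ([], r)
  let monoQ := s.1.reverse
  if s.2 > 0 then monoQ.take (monoQ.length - s.2.toNat) else monoQ

-- "no ascent": each element is ≥ its successor (A's loop never pops while scanning such a list)
def NoAsc (xs : List Int) : Prop := List.IsChain (fun a b => b ≤ a) xs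

theorem pvAcore_eq (nums : List Int) (k : Int) :
    largestKdigits nums k = pvAcore nums ((nums.length : Int) - k) := rfl

theorem run_nonpos : ∀ (xs q : List Int) (r : Int), r ≤ 0 →
    List.foldl pvStep (q, r) xs = (xs.reverse ++ q, r) := by
  intro xs
  induction xs with
  | nil => intro q r _; simp
  | cons x xs ih =>
    intro q r hr
    have hpop : pvPop q r x = (q, r) := by
      cases q with
      | nil => rfl
      | cons t rest => simp [pvPop]; omega
    simp only [List.foldl_cons, pvStep, hpop]
    rw [ih (x :: q) r hr]
    simp

theorem run_noAsc : ∀ (xs q : List Int) (r : Int), NoAsc xs →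
    (∀ t ∈ q.head?, ∀ x ∈ xs.head?, x ≤ t) →
    List.foldl pvStep (q, r) xs = (xs.reverse ++ q, r) := by
  intro xs
  induction xs with
  | nil => intro q r _ _; simp
  | cons x xs ih =>
    intro q r hna hq
    have hpop : pvPop q r x = (q, r) := by
      cases q with
      | nil => rfl
      | cons t rest =>
        have : x ≤ t := hq t rfl x rfl
        simp [pvPop]; omega
    simp only [List.foldl_cons, pvStep, hpop]
    have hq' : ∀ t ∈ (x :: q).head?, ∀ y ∈ xs.head?, y ≤ t := by
      intro t ht y hy
      simp only [List.head?_cons, Option.mem_def, Option.some.injEq] at ht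
      subst ht
      exact (List.isChain_cons.1 hna).1 y hy
    rw [ih (x :: q) r hna.tail hq']
    simp

theorem noAsc_decomp : ∀ xs : List Int,
    NoAsc xs ∨ ∃ u a b v, xs = u ++ a :: b :: v ∧ a < b ∧ NoAsc (u ++ [a]) := by
  intro xs
  induction xs with
  | nil => left; exact List.isChain_nil
  | cons x l ih =>
    cases l with
    | nil => left; exact List.isChain_singleton x
    | cons y t =>
      by_cases hxy : x < y
      · right
        exact ⟨[], x, y, t, rfl, hxy, List.isChain_singleton x⟩
      · rcases ih with hna | ⟨u, a, b, v, heq, hab, hu⟩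
        · left
          refine List.isChain_cons.2 ⟨?_, hna⟩
          intro z hz
          simp only [List.head?_cons, Option.mem_def, Option.some.injEq] at hz
          omega
        · right
          refine ⟨x :: u, a, b, v, by simp [heq], hab, ?_⟩
          refine List.isChain_cons.2 ⟨?_, hu⟩
          intro z hz
          cases u with
          | nil =>
            have hz' : a = z := by simpa using hz
            have hy : y = a := by
              have h := congrArg List.head? heq; simpa using h
            omega
          | cons c u' =>
            have hz' : c = z := by simpa using hz
            have hy : y = c := by
              have h := congrArg List.head? heq; simpa using h
            omega

theorem dropOne_noAsc : ∀ xs : List Int, NoAsc xs → pvDropOne xs = xs.dropLast := by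
  intro xs
  induction xs with
  | nil => intro _; rfl
  | cons a l ih =>
    intro hna
    cases l with
    | nil => rfl
    | cons b t =>
      have hab : b ≤ a := (List.isChain_cons.1 hna).1 b rfl
      have h1 : pvDropOne (a :: b :: t) = a :: pvDropOne (b :: t) := by
        simp [pvDropOne]; omega
      rw [h1, ih hna.tail]
      rfl

theorem dropOne_asc : ∀ (u : List Int) (a b : Int) (v : List Int), a < b → NoAsc (u ++ [a]) →
    pvDropOne (u ++ a :: b :: v) = u ++ b :: v := by
  intro u
  induction u with
  | nil => intro a b v hab _; simp [pvDropOne, hab]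
  | cons c u' ih =>
    intro a b v hab hna
    have hhd : ∀ z ∈ (u' ++ [a]).head?, z ≤ c := (List.isChain_cons.1 hna).1
    have htl : NoAsc (u' ++ [a]) := hna.tail
    cases u' with
    | nil =>
      have hca : a ≤ c := hhd a (by simp)
      have h1 : pvDropOne (c :: a :: b :: v) = c :: pvDropOne (a :: b :: v) := by
        simp [pvDropOne]; omega
      have h2 := ih a b v hab htl
      simp only [List.nil_append] at h2
      simp only [List.nil_append, List.cons_append] at h1 ⊢
      rw [h1, h2]
    | cons d u'' =>
      have hdc : d ≤ c := hhd d (by simp)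
      have h1 : pvDropOne (c :: (d :: (u'' ++ a :: b :: v))) =
          c :: pvDropOne (d :: (u'' ++ a :: b :: v)) := by
        simp [pvDropOne]; omega
      have h2 := ih a b v hab htl
      simp only [List.cons_append] at h1 h2 ⊢
      rw [h1, h2]

theorem length_dropOne : ∀ xs : List Int, (pvDropOne xs).length = xs.length - 1 := by
  intro xs
  induction xs with
  | nil => rfl
  | cons a l ih =>
    cases l with
    | nil => rfl
    | cons b t =>
      by_cases hab : a < b
      · simp [pvDropOne, hab]
      · have h1 : pvDropOne (a :: b :: t) = a :: pvDropOne (b :: t) := by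
          simp [pvDropOne, hab]
        rw [h1]
        simp only [List.length_cons] at ih ⊢
        omega

theorem length_iterDrop : ∀ (r : Nat) (xs : List Int),
    (pvIterDrop r xs).length = xs.length - r := by
  intro r
  induction r with
  | zero => intro xs; rfl
  | succ r ih =>
    intro xs
    rw [pvIterDrop, ih, length_dropOne]
    omega

theorem iterDrop_noAsc : ∀ (r : Nat) (xs : List Int), NoAsc xs →
    pvIterDrop r xs = xs.take (xs.length - r) := by
  intro r
  induction r with
  | zero => intro xs _; simp [pvIterDrop]
  | succ r ih =>
    intro xs hna
    haveI : Trans (fun (a b : Int) => b ≤ a) (fun (a b : Int) => b ≤ a)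
        (fun (a b : Int) => b ≤ a) := ⟨fun h1 h2 => le_trans h2 h1⟩
    have hna' : NoAsc xs.dropLast := hna.sublist (List.dropLast_sublist xs)
    rw [pvIterDrop, dropOne_noAsc xs hna, ih xs.dropLast hna',
      List.dropLast_eq_take, List.length_take, List.take_take]
    congr 1
    omega

theorem pvAcore_iterDrop : ∀ (r : Nat) (xs : List Int),
    pvAcore xs (r : Int) = pvIterDrop r xs := by
  intro r
  induction r with
  | zero =>
    intro xs
    simp only [pvAcore, pvIterDrop, Nat.cast_zero]
    rw [run_nonpos xs [] 0 le_rfl]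
    simp
  | succ r ih =>
    intro xs
    rcases noAsc_decomp xs with hna | ⟨u, a, b, v, heq, hab, hu⟩
    · -- no ascent: A's loop never pops, the final slice removes the last r+1 elements
      simp only [pvAcore]
      rw [run_noAsc xs [] ((r + 1 : Nat) : Int) hna (by simp)]
      have hpos : ((r + 1 : Nat) : Int) > 0 := by push_cast; omega
      rw [if_pos hpos]
      simp only [List.append_nil, List.reverse_reverse]
      rw [iterDrop_noAsc (r + 1) xs hna]
      congr 1
    · -- first ascent a < b after the non-ascending prefix u ++ [a]: A's first pop removes a,
      -- leaving the run in the same state as a budget-r run on u ++ b :: v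
      have hu' : NoAsc u := (List.isChain_append.1 hu).1
      have hlast : ∀ x ∈ u.getLast?, a ≤ x := by
        intro x hx
        exact (List.isChain_append.1 hu).2.2 x hx a rfl
      have hc : ((r + 1 : Nat) : Int) > 0 := by push_cast; omega
      have hpopa : pvPop u.reverse ((r + 1 : Nat) : Int) a = (u.reverse, ((r + 1 : Nat) : Int)) := by
        cases hrev : u.reverse with
        | nil => rfl
        | cons t rest =>
          have hgl : u.getLast? = some t := by
            rw [← List.head?_reverse, hrev]; rfl
          have hat : a ≤ t := hlast t hgl
          simp [pvPop]; omega
      have hone : pvStep (a :: u.reverse, ((r + 1 : Nat) : Int)) b =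
          pvStep (u.reverse, (r : Nat)) b := by
        have hm : ((r + 1 : Nat) : Int) - 1 = ((r : Nat) : Int) := by push_cast; omega
        simp only [pvStep]
        rw [pvPop, if_pos ⟨hc, hab⟩, hm]
      have hstate : xs.foldl pvStep ([], ((r + 1 : Nat) : Int)) =
          (u ++ b :: v).foldl pvStep ([], ((r : Nat) : Int)) := by
        rw [heq, List.foldl_append, List.foldl_append,
          run_noAsc u [] ((r + 1 : Nat) : Int) hu' (by simp),
          run_noAsc u [] ((r : Nat) : Int) hu' (by simp)]
        simp only [List.append_nil, List.foldl_cons]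
        rw [show pvStep (u.reverse, ((r + 1 : Nat) : Int)) a = (a :: u.reverse, ((r + 1 : Nat) : Int)) from by
          simp only [pvStep, hpopa]]
        rw [hone]
      simp only [pvAcore, hstate]
      have hih := ih (u ++ b :: v)
      simp only [pvAcore] at hih
      rw [hih, heq, pvIterDrop, dropOne_asc u a b v hab hu]

theorem iterDrop_of_ge : ∀ (r : Nat) (xs : List Int), xs.length ≤ r → pvIterDrop r xs = [] := by
  intro r xs h
  have h1 := length_iterDrop r xs
  have h2 : (pvIterDrop r xs).length = 0 := by omega
  exact List.length_eq_zero_iff.1 h2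

-- ===== VERDICT (by name: the statement is the Claim_ definition above) =====
theorem largestKdigits_spec : Claim_equal_largestKdigits := by
  intro nums k _
  unfold Spec_largestKdigits largestKdigits_alt
  rw [pvAcore_eq]
  set n : Int := (nums.length : Int) with hn
  by_cases hk0 : k ≤ 0
  · -- k ≤ 0: A pops/slices everything away, B returns []
    have hcast : ((n - k).toNat : Int) = n - k := by omega
    have h1 : pvAcore nums (n - k) = pvIterDrop (n - k).toNat nums := by
      rw [← hcast]; exact pvAcore_iterDrop (n - k).toNat nums
    rw [h1, iterDrop_of_ge _ _ (by omega)]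
    simp [hk0]
  · rw [if_neg hk0]
    by_cases hkn : n ≤ k
    · -- k ≥ n: no removals on either side
      rw [if_pos hkn]
      simp only [pvAcore]
      rw [run_nonpos nums [] (n - k) (by omega)]
      have hng : ¬ (n - k > 0) := by omega
      rw [if_neg hng]
      simp
    · -- 0 < k < n
      rw [if_neg hkn]
      have hcast : ((n - k).toNat : Int) = n - k := by omega
      rw [← hcast]
      exact pvAcore_iterDrop (n - k).toNat nums
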